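-- pv_equiv track=rewrite | github.com/juanestebancg2806/codeforces | 1300A/1300A.py | solve
-- ===== SOURCE A (Python) =====
-- def solve(a):
--     ans,i,N,psum,nsum = 0,0,len(a),0,0
--     for i in range(N):
--         ans,a[i] = ans+1 if a[i] == 0 else ans, 1 if a[i] == 0 else a[i]
--
--     for i in range(N):
--         psum,nsum = psum+a[i] if a[i] >= 0 else psum,nsum+a[i] if a[i] < 0 else nsum
--     if(psum == abs(nsum)):
--         ans += 1
--     return ans
-- ===== SOURCE B (Python) =====
-- def solve(a):
--     zeros = 0
--     total = 0
--     for i in range(len(a)):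
--         if a[i] == 0:
--             zeros += 1
--             a[i] = 1
--             total += 1
--         else:
--             total += a[i]
--     return zeros + (1 if total == 0 else 0)
-- ===== Notes on version B (the rewrite author's own statement) =====
-- stated objective: simpler
-- what changed: One pass with a single running total replaces A's two passes and its separate psum/abs(nsum) comparison, using psum == abs(nsum) iff the whole (post-replacement) sum is 0.
import Mathlib
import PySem

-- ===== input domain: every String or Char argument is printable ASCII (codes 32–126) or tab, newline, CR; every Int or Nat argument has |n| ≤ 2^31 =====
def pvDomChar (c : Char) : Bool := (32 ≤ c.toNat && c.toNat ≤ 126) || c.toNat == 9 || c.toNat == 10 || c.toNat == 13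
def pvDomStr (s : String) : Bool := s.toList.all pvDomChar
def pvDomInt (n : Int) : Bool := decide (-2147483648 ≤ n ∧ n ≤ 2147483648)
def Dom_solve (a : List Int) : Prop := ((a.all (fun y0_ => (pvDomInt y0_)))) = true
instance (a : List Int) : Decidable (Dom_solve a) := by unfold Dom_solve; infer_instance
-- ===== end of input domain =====

-- One-pass re-implementation with a single running total instead of A's two passes
-- and separate psum/abs(nsum) sums; equivalence is about the RETURN value only
-- (both Pythons mutate a the same way: zeros become 1).

-- ===== PORT A =====
def solve (a : List Int) : Int :=
  -- first loop: count zeros, replace 0 with 1 (mutated list rebuilt left-to-right)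
  let s1 := a.foldl
    (fun (st : Int × List Int) x =>
      ((if x = 0 then st.1 + 1 else st.1), st.2 ++ [if x = 0 then 1 else x]))
    (0, [])
  -- second loop over the mutated list
  let s2 := s1.2.foldl
    (fun (st : Int × Int) x =>
      ((if x ≥ 0 then st.1 + x else st.1), (if x < 0 then st.2 + x else st.2)))
    (0, 0)
  if s2.1 = |s2.2| then s1.1 + 1 else s1.1

-- ===== PORT B =====
def solve_alt (a : List Int) : Int :=
  let st := a.foldl
    (fun (st : Int × Int) x =>
      if x = 0 then (st.1 + 1, st.2 + 1) else (st.1, st.2 + x))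
    (0, 0)
  st.1 + (if st.2 = 0 then 1 else 0)

-- ===== PRECONDITION & SPEC =====
def Spec_solve (a : List Int) (out : Int) : Prop := out = solve_alt a
instance (a : List Int) (out : Int) : Decidable (Spec_solve a out) := by unfold Spec_solve; infer_instance

-- ===== CLAIM (what is proved, stated in full; the proofs are below) =====
def Claim_equal_solve : Prop := ∀ (a : List Int), Dom_solve a → Spec_solve a (solve a)

-- ===== LEMMAS AND PROOFS =====

-- first loop of A: zero count and the mapped list
theorem solveA_fold1 (a : List Int) (z : Int) (acc : List Int) :
    a.foldl (fun (st : Int × List Int) x =>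
      ((if x = 0 then st.1 + 1 else st.1), st.2 ++ [if x = 0 then 1 else x])) (z, acc)
    = (z + ((a.filter (fun x => x = 0)).length : Int),
       acc ++ a.map (fun x => if x = 0 then 1 else x)) := by
  induction a generalizing z acc with
  | nil => simp
  | cons h t ih =>
      simp only [List.foldl_cons, List.filter_cons, List.map_cons]
      by_cases hz : h = 0 <;> simp [hz, ih, add_comm, add_left_comm, add_assoc]

-- second loop of A: invariant (sum, lower/upper bounds)
theorem solveA_fold2 (b : List Int) (p n : Int) :
    (b.foldl (fun (st : Int × Int) x =>
      ((if x ≥ 0 then st.1 + x else st.1), (if x < 0 then st.2 + x else st.2))) (p, n)).1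
    + (b.foldl (fun (st : Int × Int) x =>
      ((if x ≥ 0 then st.1 + x else st.1), (if x < 0 then st.2 + x else st.2))) (p, n)).2
    = p + n + b.sum
    ∧ p ≤ (b.foldl (fun (st : Int × Int) x =>
      ((if x ≥ 0 then st.1 + x else st.1), (if x < 0 then st.2 + x else st.2))) (p, n)).1
    ∧ (b.foldl (fun (st : Int × Int) x =>
      ((if x ≥ 0 then st.1 + x else st.1), (if x < 0 then st.2 + x else st.2))) (p, n)).2
    ≤ n := by
  induction b generalizing p n with
  | nil => simp
  | cons h t ih =>
      simp only [List.foldl_cons, List.sum_cons]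
      by_cases hge : h ≥ 0
      · have := ih (p + h) n
        constructor
        · simp only [if_pos hge, if_neg (by omega : ¬ h < 0)]; omega
        · simp only [if_pos hge, if_neg (by omega : ¬ h < 0)]; omega
      · have := ih p (n + h)
        constructor
        · simp only [if_neg hge, if_pos (by omega : h < 0)]; omega
        · simp only [if_neg hge, if_pos (by omega : h < 0)]; omega

-- B's single loop: zero count and total sum of the mapped list
theorem solveB_fold (a : List Int) (z t : Int) :
    a.foldl (fun (st : Int × Int) x =>
      if x = 0 then (st.1 + 1, st.2 + 1) else (st.1, st.2 + x)) (z, t)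
    = (z + ((a.filter (fun x => x = 0)).length : Int),
       t + (a.map (fun x => if x = 0 then 1 else x)).sum) := by
  induction a generalizing z t with
  | nil => simp
  | cons h t' ih =>
      simp only [List.foldl_cons, List.filter_cons, List.map_cons, List.sum_cons]
      by_cases hz : h = 0
      · rw [if_pos hz, ih]
        simp [hz]
        push_cast
        constructor <;> ring
      · rw [if_neg hz, ih]
        simp [hz]
        ring

-- ===== VERDICT (by name: the statement is the Claim_ definition above) =====
theorem solve_spec : Claim_equal_solve := by
  intro a _
  show solve a = solve_alt a
  unfold solve solve_alt
  simp only [solveA_fold1, solveB_fold, List.nil_append, zero_add]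
  set b := a.map (fun x => if x = 0 then 1 else x) with hb
  obtain ⟨hsum, hp, hn⟩ := solveA_fold2 b 0 0
  set s2 := b.foldl (fun (st : Int × Int) x =>
      ((if x ≥ 0 then st.1 + x else st.1), (if x < 0 then st.2 + x else st.2))) (0, 0)
  have habs : |s2.2| = -s2.2 := abs_of_nonpos hn
  by_cases h0 : b.sum = 0
  · rw [if_pos (by omega : s2.1 = |s2.2|), if_pos h0]
  · rw [if_neg (by rw [habs]; omega), if_neg h0]
    simp
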